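-- pv_equiv track=rewrite | github.com/poliwal/Google-Foobar | Level 2/Bunny Prisoner Locating.py | solution
-- ===== SOURCE A (Python) =====
-- def solution(x,y):
--   l = [1]
--   row = (x-1)+y
--   for i in range(y-1):
--       l.append(l[i]+(i+1))
--   res = []
--   column = row
--   Elem = l[-1]
--   i = 0
--   ind = (y-1)+2
--   res.append(Elem)
--   for i in range(x-1):
--       Elem = Elem+ind
--       ind += 1
--
--   return str(Elem)
-- ===== SOURCE B (Python) =====
-- def solution(x, y):
--     # Closed form: the grid id at (x, y) is 1 + T(y-1) + (x-1)(y+1) + T(x-2)+... ,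
--     # i.e. triangular-number arithmetic instead of building the diagonal lists.
--     # range(n) is empty for n <= 0, so the loop counts are max(.,0).
--     m = max(x - 1, 0)
--     t = max(y - 1, 0)
--     return str(1 + t * (t + 1) // 2 + m * (y + 1) + m * (m - 1) // 2)
-- ===== Notes on version B (the rewrite author's own statement) =====
-- stated objective: faster
-- what changed: Replaced the two loops (building the first-column list, then stepping along the row) by a closed-form triangular-number formula evaluated in O(1).
import Mathlib
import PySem

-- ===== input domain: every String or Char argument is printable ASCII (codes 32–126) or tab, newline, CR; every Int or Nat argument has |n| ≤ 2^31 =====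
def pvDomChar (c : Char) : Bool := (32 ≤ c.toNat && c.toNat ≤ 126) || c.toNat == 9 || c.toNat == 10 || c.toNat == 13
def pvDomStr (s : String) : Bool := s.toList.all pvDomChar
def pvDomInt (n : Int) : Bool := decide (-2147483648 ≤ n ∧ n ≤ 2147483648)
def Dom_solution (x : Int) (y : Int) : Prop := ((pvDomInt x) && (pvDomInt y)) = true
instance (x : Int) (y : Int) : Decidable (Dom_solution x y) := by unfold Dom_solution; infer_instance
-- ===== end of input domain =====

-- B replaces A's two loops by an O(1) closed-form triangular-number formula (same return value).


-- ===== PORT A =====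
-- l[i] and l[-1] are always in range in A (the list has length i+1 when l[i] is read,
-- and always starts from [1]), so Python never raises here; ported with pyGetD (default 0).
-- row/column/res are dead variables in A and are omitted.
def solution (x : Int) (y : Int) : String :=
  let l : List Int := [1]
  let l := (PySem.List.pyRange 0 (y - 1) 1).foldl
      (fun l i => l ++ [PySem.List.pyGetD l i 0 + (i + 1)]) l
  let Elem := PySem.List.pyGetD l (-1) 0
  let ind := (y - 1) + 2
  let p := (PySem.List.pyRange 0 (x - 1) 1).foldl
      (fun (p : Int × Int) _i => (p.1 + p.2, p.2 + 1)) (Elem, ind)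
  PySem.Int.toStr p.1

-- ===== PORT B =====
def solution_alt (x : Int) (y : Int) : String :=
  let m := max (x - 1) 0
  let t := max (y - 1) 0
  PySem.Int.toStr (1 + PySem.Int.floordiv (t * (t + 1)) 2 + m * (y + 1)
                     + PySem.Int.floordiv (m * (m - 1)) 2)

-- ===== PRECONDITION & SPEC =====
def Spec_solution (x : Int) (y : Int) (out : String) : Prop := out = solution_alt x y
instance (x : Int) (y : Int) (out : String) : Decidable (Spec_solution x y out) := by unfold Spec_solution; infer_instance

-- ===== CLAIM (what is proved, stated in full; the proofs are below) =====
def Claim_equal_solution : Prop := ∀ (x : Int) (y : Int), Dom_solution x y → Spec_solution x y (solution x y)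

-- ===== LEMMAS AND PROOFS =====

/-- Triangular numbers, recursively (proof-side helper). -/
def triN : Nat → Int
  | 0 => 0
  | n + 1 => triN n + (n + 1)

theorem triN_eq (k : Nat) :
    triN k = PySem.Int.floordiv ((k : Int) * ((k : Int) + 1)) 2 := by
  rw [PySem.Int.floordiv_eq_ediv_of_pos (by omega)]
  induction k with
  | zero => simp [triN]
  | succ n ih =>
    have h : ((n : Int) + 1) * (((n : Int) + 1) + 1) = (n : Int) * (n : Int) + 3 * n + 2 := by ring
    have h2 : (n : Int) * ((n : Int) + 1) = (n : Int) * (n : Int) + n := by ring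
    rw [h2] at ih
    simp only [triN]
    push_cast
    rw [h]
    omega

theorem triN_sub_eq (k : Nat) :
    triN k - k = PySem.Int.floordiv ((k : Int) * ((k : Int) - 1)) 2 := by
  have := triN_eq k
  rw [PySem.Int.floordiv_eq_ediv_of_pos (by omega)] at this ⊢
  have h : (k : Int) * ((k : Int) + 1) = (k : Int) * ((k : Int) - 1) + 2 * k := by ring
  rw [h] at this
  omega

/-- pyRange with nonpositive length collapses to the toNat form. -/
theorem pyRange_toNat (m : Int) :
    PySem.List.pyRange 0 m 1 = PySem.List.pyRange 0 (m.toNat : Int) 1 := by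
  by_cases h : m ≤ 0
  · rw [PySem.List.pyRange_one_eq_nil h, PySem.List.pyRange_one_eq_nil (by omega)]
  · rw [Int.toNat_of_nonneg (by omega)]

/-- A's first loop builds the list [1 + triN 0, …, 1 + triN n]. -/
theorem loop1 (n : Nat) :
    (PySem.List.pyRange 0 (n : Int) 1).foldl
        (fun l i => l ++ [PySem.List.pyGetD l i 0 + (i + 1)]) [1]
      = (List.range (n + 1)).map (fun k => 1 + triN k) := by
  induction n with
  | zero => simp [PySem.List.pyRange_one_eq_nil, triN]
  | succ n ih =>
    have hsplit : PySem.List.pyRange 0 ((n + 1 : Nat) : Int) 1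
        = PySem.List.pyRange 0 (n : Int) 1 ++ [(n : Int)] := by
      push_cast
      exact PySem.List.pyRange_one_succ_right (by positivity)
    rw [hsplit, List.foldl_append, ih]
    simp only [List.foldl_cons, List.foldl_nil]
    rw [PySem.List.pyGetD_natCast, PySem.List.getD_map_range _ _ _ _ (by omega)]
    conv_rhs => rw [show n + 1 + 1 = (n + 1) + 1 from rfl, List.range_succ, List.map_append]
    simp only [triN, List.map_cons, List.map_nil]
    congr 2
    ring

/-- A's second loop from state (e, d), run n times. -/
theorem loop2 (n : Nat) (e d : Int) :
    (PySem.List.pyRange 0 (n : Int) 1).foldl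
        (fun (p : Int × Int) _i => (p.1 + p.2, p.2 + 1)) (e, d)
      = (e + n * d + triN n - n, d + n) := by
  induction n generalizing e d with
  | zero => simp [PySem.List.pyRange_one_eq_nil, triN]
  | succ n ih =>
    have hsplit : PySem.List.pyRange 0 ((n + 1 : Nat) : Int) 1
        = PySem.List.pyRange 0 (n : Int) 1 ++ [(n : Int)] := by
      push_cast
      exact PySem.List.pyRange_one_succ_right (by positivity)
    rw [hsplit, List.foldl_append, ih]
    simp only [List.foldl_cons, List.foldl_nil, triN, Prod.mk.injEq]
    constructor <;> push_cast <;> ring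

-- ===== VERDICT (by name: the statement is the Claim_ definition above) =====
theorem solution_spec : Claim_equal_solution := by
  intro x y _
  show solution x y = solution_alt x y
  simp only [solution, solution_alt]
  rw [pyRange_toNat (y - 1), pyRange_toNat (x - 1), loop1 ((y - 1).toNat)]
  rw [List.range_succ, List.map_append, List.map_singleton,
      PySem.List.pyGetD_neg_one_append_singleton]
  rw [loop2]
  have h1 : max (y - 1) 0 = (((y - 1).toNat : Nat) : Int) := by omega
  have h2 : max (x - 1) 0 = (((x - 1).toNat : Nat) : Int) := by omega
  rw [h1, h2, ← triN_eq, ← triN_sub_eq]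
  congr 1
  ring
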